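-- pv_equiv track=rewrite | github.com/skrtis/boltzio | src/boltz2/renumber.py | find_field_positions
-- ===== SOURCE A (Python) =====
-- from typing import List, Optional, Tuple
--
-- def find_field_positions(line: str) -> List[Tuple[int, int, str]]:
--     """Find the start position, end position, and value of each whitespace-separated field.
--
--     Handles quoted strings in mmCIF format.
--
--     Args:
--         line: A line of text from an mmCIF file.
--
--     Returns:
--         List of tuples containing (start_pos, end_pos, value) for each field.
--
--     Example:
--         >>> fields = find_field_positions("ATOM 1 CA ALA A 1")
--         >>> fields[0]
--         (0, 4, 'ATOM')
--     """
--     fields = []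
--     i = 0
--     while i < len(line):
--         # Skip whitespace
--         while i < len(line) and line[i] in " \t":
--             i += 1
--         if i >= len(line):
--             break
--
--         # Found start of field
--         start = i
--
--         # Handle quoted strings
--         if line[i] in "\"'":
--             quote_char = line[i]
--             i += 1
--             while i < len(line) and line[i] != quote_char:
--                 i += 1
--             if i < len(line):
--                 i += 1  # Include closing quote
--         else:
--             # Regular field - find end
--             while i < len(line) and line[i] not in " \t":
--                 i += 1
--
--         end = i
--         value = line[start:end]
--         fields.append((start, end, value))
--
--     return fields
-- ===== SOURCE B (Python) =====
-- from typing import List, Tuple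
--
--
-- def _nonws_prefix(s: str) -> str:
--     """Longest prefix of s with no space/tab."""
--     for k, ch in enumerate(s):
--         if ch in " \t":
--             return s[:k]
--     return s
--
--
-- def find_field_positions(line: str) -> List[Tuple[int, int, str]]:
--     """Suffix-slicing tokenizer: repeatedly lstrip whitespace off the remaining
--     suffix, then cut one whole token off its front with find/prefix helpers."""
--     fields = []
--     pos = 0
--     rest = line
--     while True:
--         stripped = rest.lstrip(" \t")
--         pos += len(rest) - len(stripped)
--         if not stripped:
--             return fields
--         if stripped[0] in "\"'":
--             j = stripped.find(stripped[0], 1)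
--             tok = stripped if j == -1 else stripped[: j + 1]
--         else:
--             tok = _nonws_prefix(stripped)
--         fields.append((pos, pos + len(tok), tok))
--         pos += len(tok)
--         rest = stripped[len(tok):]
-- ===== Notes on version B (the rewrite author's own statement) =====
-- stated objective: alternative
-- what changed: A steps a single index through nested while-loops over the whole line; B repeatedly slices the remaining suffix, using lstrip to skip whitespace and find / a non-whitespace-prefix helper to cut one whole token off the front, tracking positions by length arithmetic.
import Mathlib
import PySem

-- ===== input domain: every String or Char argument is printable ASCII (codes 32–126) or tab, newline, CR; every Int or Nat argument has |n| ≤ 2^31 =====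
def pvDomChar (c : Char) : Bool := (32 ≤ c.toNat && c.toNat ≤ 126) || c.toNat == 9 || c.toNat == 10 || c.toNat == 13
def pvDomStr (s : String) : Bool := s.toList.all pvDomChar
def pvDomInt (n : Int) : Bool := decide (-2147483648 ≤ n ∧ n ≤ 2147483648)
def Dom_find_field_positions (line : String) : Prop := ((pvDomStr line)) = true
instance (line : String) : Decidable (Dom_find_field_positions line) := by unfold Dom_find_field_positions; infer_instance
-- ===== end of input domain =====

-- B replaces A's index-stepping while loops by suffix slicing (lstrip + prefix cuts); an alternative structure with the same linear cost.


-- ===== PORT A =====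
-- Python membership tests `c in " \t"` and `c in "\"'"`:
def pvAIsWS (c : Char) : Bool := c == ' ' || c == '\t'
def pvAIsQuote (c : Char) : Bool := c == '"' || c == '\''

-- inner loop `while i < len(line) and line[i] in " \t": i += 1` (index always in range, so getD is exact)
def pvASkipWS (s : List Char) (i : Nat) : Nat :=
  if h : i < s.length ∧ pvAIsWS (s.getD i ' ') then pvASkipWS s (i + 1) else i
termination_by s.length - i
decreasing_by exact Nat.sub_succ_lt_self _ _ h.1

-- inner loop `while i < len(line) and line[i] != quote_char: i += 1`
def pvAScanQuote (s : List Char) (q : Char) (i : Nat) : Nat :=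
  if h : i < s.length ∧ s.getD i ' ' ≠ q then pvAScanQuote s q (i + 1) else i
termination_by s.length - i
decreasing_by exact Nat.sub_succ_lt_self _ _ h.1

-- inner loop `while i < len(line) and line[i] not in " \t": i += 1`
def pvAScanField (s : List Char) (i : Nat) : Nat :=
  if h : i < s.length ∧ ¬ pvAIsWS (s.getD i ' ') then pvAScanField s (i + 1) else i
termination_by s.length - i
decreasing_by exact Nat.sub_succ_lt_self _ _ h.1

-- the field-body branch of A: the value of i after scanning one field that starts at j
def pvAEnd (s : List Char) (j : Nat) : Nat :=
  if pvAIsQuote (s.getD j ' ') then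
    -- quote_char = line[i]; i += 1; scan to the quote; include it if found
    if pvAScanQuote s (s.getD j ' ') (j + 1) < s.length then
      pvAScanQuote s (s.getD j ' ') (j + 1) + 1
    else
      pvAScanQuote s (s.getD j ' ') (j + 1)
  else
    pvAScanField s j

-- the three scans never move left (needed for the outer loop's termination)
theorem pvASkipWS_ge (s : List Char) (i : Nat) : i ≤ pvASkipWS s i := by
  unfold pvASkipWS
  split
  · exact le_trans (by omega) (pvASkipWS_ge s (i + 1))
  · exact le_refl i
termination_by s.length - i
decreasing_by omega

theorem pvAScanQuote_ge (s : List Char) (q : Char) (i : Nat) : i ≤ pvAScanQuote s q i := by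
  unfold pvAScanQuote
  split
  · exact le_trans (by omega) (pvAScanQuote_ge s q (i + 1))
  · exact le_refl i
termination_by s.length - i
decreasing_by omega

theorem pvAScanField_ge (s : List Char) (i : Nat) : i ≤ pvAScanField s i := by
  unfold pvAScanField
  split
  · exact le_trans (by omega) (pvAScanField_ge s (i + 1))
  · exact le_refl i
termination_by s.length - i
decreasing_by omega

-- where pvASkipWS stops, the character (if any) is not whitespace
theorem pvASkipWS_stop (s : List Char) (i : Nat) (h : pvASkipWS s i < s.length) :
    pvAIsWS (s.getD (pvASkipWS s i) ' ') = false := by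
  by_cases hc : i < s.length ∧ pvAIsWS (s.getD i ' ') = true
  · rw [pvASkipWS, dif_pos hc] at h ⊢
    exact pvASkipWS_stop s (i + 1) h
  · rw [pvASkipWS, dif_neg hc] at h ⊢
    rcases Decidable.not_and_iff_not_or_not.mp hc with h1 | h2
    · omega
    · revert h2; cases pvAIsWS (s.getD i ' ') <;> simp
termination_by s.length - i
decreasing_by omega

-- a field scan starting on a non-whitespace in-range character advances
theorem pvAScanField_adv (s : List Char) (j : Nat) (hj : j < s.length)
    (hw : pvAIsWS (s.getD j ' ') = false) : j + 1 ≤ pvAScanField s j := by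
  rw [pvAScanField, dif_pos ⟨hj, by rw [hw]; decide⟩]
  exact pvAScanField_ge s (j + 1)

-- a field starting in range on non-whitespace ends strictly after its start
theorem pvAEnd_gt (s : List Char) (j : Nat) (hj : j < s.length)
    (hw : pvAIsWS (s.getD j ' ') = false) : j + 1 ≤ pvAEnd s j := by
  unfold pvAEnd
  split
  · have h2 := pvAScanQuote_ge s (s.getD j ' ') (j + 1)
    split <;> omega
  · exact pvAScanField_adv s j hj hw

-- outer `while i < len(line)` loop of A; slice line[start:end] ported as (take end).drop start
-- (exact here: 0 ≤ start ≤ end ≤ len)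
def pvALoop (s : List Char) (i : Nat) : List (Int × Int × String) :=
  if hi : i < s.length then
    if hj : pvASkipWS s i < s.length then
      ((pvASkipWS s i : Int), (pvAEnd s (pvASkipWS s i) : Int),
        String.mk ((s.take (pvAEnd s (pvASkipWS s i))).drop (pvASkipWS s i))) ::
        pvALoop s (pvAEnd s (pvASkipWS s i))
    else []
  else []
termination_by s.length - i
decreasing_by
  exact Nat.sub_lt_sub_left hi
    (Nat.lt_of_le_of_lt (pvASkipWS_ge s i) (pvAEnd_gt s (pvASkipWS s i) hj (pvASkipWS_stop s i hj)))

def find_field_positions (line : String) : List (Int × Int × String) :=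
  pvALoop line.toList 0

-- ===== PORT B =====
def pvBIsWS (c : Char) : Bool := c == ' ' || c == '\t'
def pvBIsQuote (c : Char) : Bool := c == '"' || c == '\''

-- Source B's `_nonws_prefix`: the prefix up to the first space/tab
def pvBNonwsPrefix : List Char → List Char
  | [] => []
  | c :: cs => if pvBIsWS c then [] else c :: pvBNonwsPrefix cs

-- the token cut off the front of the stripped suffix `c :: rest`
-- (str.find(q, 1) is findIdx? on the tail; -1/found become the none/some branches)
def pvBTok (c : Char) (rest : List Char) : List Char :=
  if pvBIsQuote c then
    match rest.findIdx? (· == c) with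
    | none => c :: rest
    | some j => (c :: rest).take (j + 2)
  else
    pvBNonwsPrefix (c :: rest)

theorem pvBNonwsPrefix_len (c : Char) (cs : List Char) (h : pvBIsWS c = false) :
    0 < (pvBNonwsPrefix (c :: cs)).length := by
  simp [pvBNonwsPrefix, h]

theorem pv_dropWhile_head (p : Char → Bool) (l : List Char) (c : Char) (cs : List Char)
    (h : l.dropWhile p = c :: cs) : p c = false := by
  induction l with
  | nil => simp at h
  | cons a as ih =>
    rw [List.dropWhile_cons] at h
    split at h
    · exact ih h
    · rename_i ha
      injection h with h1 _
      subst h1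
      revert ha; cases p a <;> simp

theorem pvBTok_len (c : Char) (rest : List Char) (h : pvBIsWS c = false) :
    0 < (pvBTok c rest).length := by
  unfold pvBTok
  split
  · split <;> simp [List.length_take] <;> omega
  · exact pvBNonwsPrefix_len c rest h

-- Source B's main loop over the remaining suffix `rest`, carrying the absolute position `pos`;
-- lstrip(" \t") is dropWhile
def pvBGo (cs : List Char) (pos : Nat) : List (Int × Int × String) :=
  match hstr : cs.dropWhile pvBIsWS with
  | [] => []
  | c :: rest =>
    (((pos + (cs.length - (c :: rest).length) : Nat) : Int),
     ((pos + (cs.length - (c :: rest).length) + (pvBTok c rest).length : Nat) : Int),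
     String.mk (pvBTok c rest)) ::
      pvBGo ((c :: rest).drop (pvBTok c rest).length)
        (pos + (cs.length - (c :: rest).length) + (pvBTok c rest).length)
termination_by cs.length
decreasing_by
  have hle : (c :: rest).length ≤ cs.length :=
    hstr ▸ List.length_dropWhile_le pvBIsWS cs
  have htok := pvBTok_len c rest (pv_dropWhile_head pvBIsWS cs c rest hstr)
  rw [List.length_drop]
  exact Nat.lt_of_lt_of_le (Nat.sub_lt (Nat.succ_pos rest.length) htok) hle

def find_field_positions_alt (line : String) : List (Int × Int × String) :=
  pvBGo line.toList 0

-- ===== PRECONDITION & SPEC =====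
def Spec_find_field_positions (line : String) (out : List (Int × Int × String)) : Prop := out = find_field_positions_alt line
instance (line : String) (out : List (Int × Int × String)) : Decidable (Spec_find_field_positions line out) := by unfold Spec_find_field_positions; infer_instance

-- ===== CLAIM (what is proved, stated in full; the proofs are below) =====
def Claim_equal_find_field_positions : Prop := ∀ (line : String), Dom_find_field_positions line → Spec_find_field_positions line (find_field_positions line)

-- ===== LEMMAS AND PROOFS =====

theorem pv_dw_eq (p : Char → Bool) (l : List Char) :
    l.dropWhile p = l.drop (l.takeWhile p).length := by
  induction l with
  | nil => rfl
  | cons c cs ih =>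
    by_cases h : p c = true
    · simp [List.dropWhile_cons, List.takeWhile_cons, h, ih]
    · simp [List.dropWhile_cons, List.takeWhile_cons, h]

theorem pv_tw_take (p : Char → Bool) (l : List Char) :
    l.take (l.takeWhile p).length = l.takeWhile p := by
  induction l with
  | nil => rfl
  | cons c cs ih =>
    by_cases h : p c = true
    · simp [List.takeWhile_cons, h, ih]
    · simp [List.takeWhile_cons, h]

theorem pvASkipWS_eq (s : List Char) (i : Nat) :
    pvASkipWS s i = i + ((s.drop i).takeWhile pvAIsWS).length := by
  rw [pvASkipWS]
  split
  · rename_i hc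
    obtain ⟨hi, hw⟩ := hc
    rw [pvASkipWS_eq s (i + 1), List.drop_eq_getElem_cons hi, List.takeWhile_cons]
    rw [List.getD_eq_getElem s ' ' hi] at hw
    simp [hw]; omega
  · rename_i hc
    push_neg at hc
    by_cases hi : i < s.length
    · have hw := hc hi
      rw [List.drop_eq_getElem_cons hi, List.takeWhile_cons]
      rw [List.getD_eq_getElem s ' ' hi] at hw
      simp at hw
      simp [hw]
    · rw [List.drop_eq_nil_of_le (by omega)]; simp
termination_by s.length - i
decreasing_by omega

theorem pvAScanQuote_eq (s : List Char) (q : Char) (i : Nat) :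
    pvAScanQuote s q i = i + ((s.drop i).takeWhile (fun d => !(d == q))).length := by
  rw [pvAScanQuote]
  split
  · rename_i hc
    obtain ⟨hi, hw⟩ := hc
    rw [pvAScanQuote_eq s q (i + 1), List.drop_eq_getElem_cons hi, List.takeWhile_cons]
    rw [List.getD_eq_getElem s ' ' hi] at hw
    simp [hw]; omega
  · rename_i hc
    push_neg at hc
    by_cases hi : i < s.length
    · have hw := hc hi
      rw [List.drop_eq_getElem_cons hi, List.takeWhile_cons]
      rw [List.getD_eq_getElem s ' ' hi] at hw
      simp [hw]
    · rw [List.drop_eq_nil_of_le (by omega)]; simp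
termination_by s.length - i
decreasing_by omega

theorem pvAScanField_eq (s : List Char) (i : Nat) :
    pvAScanField s i = i + ((s.drop i).takeWhile (fun d => !(pvAIsWS d))).length := by
  rw [pvAScanField]
  split
  · rename_i hc
    obtain ⟨hi, hw⟩ := hc
    rw [pvAScanField_eq s (i + 1), List.drop_eq_getElem_cons hi, List.takeWhile_cons]
    rw [List.getD_eq_getElem s ' ' hi] at hw
    simp at hw
    simp [hw]; omega
  · rename_i hc
    push_neg at hc
    by_cases hi : i < s.length
    · have hw := hc hi
      rw [List.drop_eq_getElem_cons hi, List.takeWhile_cons]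
      rw [List.getD_eq_getElem s ' ' hi] at hw
      simp [hw]
    · rw [List.drop_eq_nil_of_le (by omega)]; simp
termination_by s.length - i
decreasing_by omega

theorem pv_findIdx_none (l : List Char) (c : Char) (h : l.findIdx? (· == c) = none) :
    l.takeWhile (fun d => !(d == c)) = l := by
  induction l with
  | nil => rfl
  | cons a as ih =>
    rw [List.findIdx?_cons] at h
    split at h
    · simp at h
    · rename_i ha
      have ha' : (a == c) = false := by revert ha; cases (a == c) <;> simp
      cases hfi : as.findIdx? (· == c) with
      | none => simp [List.takeWhile_cons, ha', ih hfi]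
      | some j => rw [hfi] at h; simp at h

theorem pv_findIdx_some (l : List Char) (c : Char) (j : Nat) (h : l.findIdx? (· == c) = some j) :
    (l.takeWhile (fun d => !(d == c))).length = j ∧ j < l.length := by
  induction l generalizing j with
  | nil => simp [List.findIdx?_nil] at h
  | cons a as ih =>
    rw [List.findIdx?_cons] at h
    split at h
    · rename_i ha
      simp at h
      subst h
      simp [List.takeWhile_cons, ha]
    · rename_i ha
      simp at ha
      cases hfi : as.findIdx? (· == c) with
      | none => rw [hfi] at h; simp at h
      | some j' =>
        rw [hfi] at h
        simp at h
        obtain ⟨h1, h2⟩ := ih j' hfi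
        simp [List.takeWhile_cons, ha, h1, ← h]
        omega

theorem pvBNonwsPrefix_eq (l : List Char) :
    pvBNonwsPrefix l = l.takeWhile (fun d => !(pvBIsWS d)) := by
  induction l with
  | nil => rfl
  | cons c cs ih =>
    by_cases h : pvBIsWS c = true
    · simp [pvBNonwsPrefix, List.takeWhile_cons, h]
    · simp at h
      simp [pvBNonwsPrefix, List.takeWhile_cons, h, ih]

theorem pvBGo_nil (cs : List Char) (pos : Nat) (h : cs.dropWhile pvBIsWS = []) :
    pvBGo cs pos = [] := by
  rw [pvBGo]
  split
  · rfl
  · rename_i c rest heq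
    rw [h] at heq
    cases heq

theorem pvBGo_cons (cs : List Char) (pos : Nat) (c : Char) (rest : List Char)
    (h : cs.dropWhile pvBIsWS = c :: rest) :
    pvBGo cs pos =
      (((pos + (cs.length - (c :: rest).length) : Nat) : Int),
       ((pos + (cs.length - (c :: rest).length) + (pvBTok c rest).length : Nat) : Int),
       String.mk (pvBTok c rest)) ::
        pvBGo ((c :: rest).drop (pvBTok c rest).length)
          (pos + (cs.length - (c :: rest).length) + (pvBTok c rest).length) := by
  rw [pvBGo]
  split
  · rename_i heq
    rw [h] at heq
    cases heq
  · rename_i c' rest' heq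
    rw [h] at heq
    injection heq with e1 e2
    subst e1; subst e2
    rfl

theorem pvBTok_take (c : Char) (rest : List Char) :
    (c :: rest).take (pvBTok c rest).length = pvBTok c rest := by
  unfold pvBTok
  by_cases hq : pvBIsQuote c = true
  · simp only [hq, if_true]
    cases hfi : rest.findIdx? (· == c) with
    | none => simp
    | some j =>
      show (c :: rest).take ((c :: rest).take (j + 2)).length = (c :: rest).take (j + 2)
      rw [List.length_take, List.length_cons, ← List.take_take]
      congr 1
      rw [show rest.length + 1 = (c :: rest).length from rfl, List.take_length]
  · rw [if_neg hq, pvBNonwsPrefix_eq]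
    exact pv_tw_take _ _

theorem pv_main (s : List Char) (i : Nat) : pvALoop s i = pvBGo (s.drop i) i := by
  have hdw : (s.drop i).dropWhile pvBIsWS = s.drop (pvASkipWS s i) := by
    rw [pv_dw_eq, show pvBIsWS = pvAIsWS from rfl, List.drop_drop, pvASkipWS_eq]
  by_cases hj : pvASkipWS s i < s.length
  · have hij := pvASkipWS_ge s i
    have hi : i < s.length := by omega
    have hnw : pvAIsWS (s.getD (pvASkipWS s i) ' ') = false := pvASkipWS_stop s i hj
    have hj0 := hj
    obtain ⟨j, hjd⟩ : ∃ j, pvASkipWS s i = j := ⟨_, rfl⟩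
    rw [hjd] at hj hij hnw hdw
    have hget : s.getD j ' ' = s[j]'hj := List.getD_eq_getElem s ' ' hj
    obtain ⟨c, hcd⟩ : ∃ c, s[j]'hj = c := ⟨_, rfl⟩
    rw [hcd] at hget
    have hcons : s.drop j = c :: s.drop (j + 1) := by
      rw [List.drop_eq_getElem_cons hj, hcd]
    have hdc : (s.drop i).dropWhile pvBIsWS = c :: s.drop (j + 1) := by rw [hdw, hcons]
    have hgt : j + 1 ≤ pvAEnd s j := pvAEnd_gt s j hj hnw
    have hTL : pvAEnd s j = j + (pvBTok c (s.drop (j + 1))).length := by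
      unfold pvAEnd pvBTok
      rw [hget, show pvAIsQuote c = pvBIsQuote c from rfl]
      by_cases hquote : pvBIsQuote c = true
      · rw [if_pos hquote, if_pos hquote]
        cases hfi : (s.drop (j + 1)).findIdx? (· == c) with
        | none =>
          have htw := pv_findIdx_none _ _ hfi
          have hk : pvAScanQuote s c (j + 1) = s.length := by
            rw [pvAScanQuote_eq, htw, List.length_drop]; omega
          rw [hk, if_neg (lt_irrefl _)]
          simp only [List.length_cons, List.length_drop]
          omega
        | some j' =>
          obtain ⟨htw, hlt⟩ := pv_findIdx_some _ _ _ hfi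
          rw [List.length_drop] at hlt
          have hk : pvAScanQuote s c (j + 1) = j + 1 + j' := by
            rw [pvAScanQuote_eq, htw]
          rw [hk, if_pos (by omega)]
          simp only [List.length_take, List.length_cons, List.length_drop]
          omega
      · rw [if_neg hquote, if_neg hquote]
        rw [pvAScanField_eq, hcons, pvBNonwsPrefix_eq]
        rfl
    have hS : (s.take (pvAEnd s j)).drop j = pvBTok c (s.drop (j + 1)) := by
      rw [List.drop_take, hcons, hTL, Nat.add_sub_cancel_left]
      exact pvBTok_take c (s.drop (j + 1))
    have hR : (c :: s.drop (j + 1)).drop (pvBTok c (s.drop (j + 1))).length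
        = s.drop (j + (pvBTok c (s.drop (j + 1))).length) := by
      rw [← hcons, List.drop_drop]
    rw [pvALoop, dif_pos hi, dif_pos hj0, hjd]
    rw [pvBGo_cons _ _ _ _ hdc]
    have hpos : i + ((s.drop i).length - (c :: s.drop (j + 1)).length) = j := by
      simp [List.length_drop]; omega
    have hdec : i < j + (pvBTok c (s.drop (j + 1))).length := by omega
    have hrec := pv_main s (j + (pvBTok c (s.drop (j + 1))).length)
    rw [hpos, hS, hTL, hR, ← hrec]
  · have hnil : (s.drop i).dropWhile pvBIsWS = [] := by
      rw [hdw]; exact List.drop_eq_nil_of_le (by omega)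
    rw [pvALoop, pvBGo_nil _ _ hnil]
    split <;> rfl
termination_by s.length - i
decreasing_by omega

-- ===== VERDICT (by name: the statement is the Claim_ definition above) =====
theorem find_field_positions_spec : Claim_equal_find_field_positions := by
  intro line _
  unfold Spec_find_field_positions find_field_positions find_field_positions_alt
  simpa using pv_main line.toList 0
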